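-- pv_equiv track=rewrite | github.com/RoySong12/Python_ALGO | SWEA/SWEA_D2/swea_elecbus.py | count_charge
-- ===== SOURCE A (Python) =====
-- def count_charge(K,N,M,chargers):
--     idx = 0
--     count = 0
--
--     while idx < N: #True는 반복, False는 종료
--         num = [c for c in chargers if idx < c and c <= idx + K]
--
--         if idx + K >= N:
--             return count # 더이상 충전 필요 없어
--         if len(num) == 0 :
--             return 0
--         else:
--             idx = max(num)
--             count += 1
-- ===== SOURCE B (Python) =====
-- def count_charge(K, N, M, chargers):
--     # Sort the chargers once; since the greedily chosen stops strictly increase,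
--     # a single forward pointer over the sorted list replaces A's per-step
--     # filter+max scan of the whole list.
--     s = sorted(chargers)
--     j = 0
--     idx = 0
--     count = 0
--     while idx + K < N:
--         best = None
--         while j < len(s) and s[j] <= idx + K:
--             best = s[j]
--             j += 1
--         if best is None or best <= idx:
--             return 0
--         idx = best
--         count += 1
--     return count
-- ===== Notes on version B (the rewrite author's own statement) =====
-- stated objective: alternative
-- what changed: A rescans all chargers with filter+max at every hop; B sorts the chargers once and walks a single forward pointer over the sorted list (the greedy stops strictly increase), so each charger is inspected once after the sort; it trades A's per-hop scans for an upfront sort.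
-- outside the precondition, e.g. on count_charge(3, 0, 0, []): A returns None, B returns 0
import Mathlib
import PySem

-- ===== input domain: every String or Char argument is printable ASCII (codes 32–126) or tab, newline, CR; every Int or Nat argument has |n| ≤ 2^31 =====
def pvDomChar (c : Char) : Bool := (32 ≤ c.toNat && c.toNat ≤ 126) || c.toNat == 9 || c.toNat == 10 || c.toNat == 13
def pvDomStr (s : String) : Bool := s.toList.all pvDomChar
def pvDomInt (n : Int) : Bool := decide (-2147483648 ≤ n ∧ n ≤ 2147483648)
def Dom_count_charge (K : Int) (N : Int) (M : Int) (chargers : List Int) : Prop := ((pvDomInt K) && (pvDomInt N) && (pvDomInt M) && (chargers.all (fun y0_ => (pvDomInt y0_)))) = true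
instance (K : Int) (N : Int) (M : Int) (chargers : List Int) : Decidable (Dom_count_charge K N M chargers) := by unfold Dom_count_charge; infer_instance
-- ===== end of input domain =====

-- B sorts the chargers once and walks one forward pointer over the sorted list
-- instead of A's per-hop filter+max rescan (objective: alternative algorithm, same result).


-- ===== PORT A =====
-- A's while-loop; `none` = the loop falls through without a return (Python returns None,
-- which happens exactly when N ≤ 0 — excluded by Pre_).
def loopA (K N : Int) (chargers : List Int) (idx count : Int) : Option Int :=
  if _h : idx < N then
    let num := chargers.filter (fun c => decide (idx < c) && decide (c ≤ idx + K))
    if idx + K ≥ N then some count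
    else if _h2 : num.length = 0 then some 0
    else
      match h : PySem.List.max? num (fun x => x) with
      | none => some 0  -- unreachable: num ≠ [] here
      | some m => loopA K N chargers m (count + 1)
  else none
termination_by (N - idx).toNat
decreasing_by
  have hm := PySem.List.max?_mem h
  simp [num, List.mem_filter] at hm
  omega

def count_charge (K : Int) (N : Int) (M : Int) (chargers : List Int) : Int :=
  (loopA K N chargers 0 0).getD 0

-- ===== PORT B =====
-- B's outer while-loop; the forward pointer j over the sorted list is carried as the
-- remaining suffix `rest`; the inner while (advance j, remembering the last consumed
-- element) is takeWhile/dropWhile + getLast?.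
def loopB (K N : Int) (rest : List Int) (idx count : Int) : Int :=
  if idx + K < N then
    match h : (rest.takeWhile (fun c => decide (c ≤ idx + K))).getLast? with
    | none => 0
    | some b =>
      if b ≤ idx then 0
      else loopB K N (rest.dropWhile (fun c => decide (c ≤ idx + K))) b (count + 1)
  else count
termination_by rest.length
decreasing_by
  have hne : rest.takeWhile (fun c => decide (c ≤ idx + K)) ≠ [] := by
    intro hnil; rw [hnil] at h; simp at h
  have := List.takeWhile_append_dropWhile (p := fun c => decide (c ≤ idx + K)) (l := rest)
  have hlen : (rest.takeWhile (fun c => decide (c ≤ idx + K))).length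
      + (rest.dropWhile (fun c => decide (c ≤ idx + K))).length = rest.length := by
    rw [← List.length_append, this]
  have : 0 < (rest.takeWhile (fun c => decide (c ≤ idx + K))).length :=
    List.length_pos_iff.mpr hne
  omega

def count_charge_alt (K : Int) (N : Int) (M : Int) (chargers : List Int) : Int :=
  loopB K N (PySem.List.sorted chargers (fun x => x) false) 0 0

-- ===== PRECONDITION & SPEC =====
-- Pre_ excludes N ≤ 0, where Python A's while-loop body never runs and A returns None (not an int).
def Pre_count_charge (K : Int) (N : Int) (M : Int) (chargers : List Int) : Prop := 0 < N
instance (K : Int) (N : Int) (M : Int) (chargers : List Int) : Decidable (Pre_count_charge K N M chargers) := by unfold Pre_count_charge; infer_instance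
def pvWitness_count_charge : Int × Int × Int × List Int := (3, 10, 4, [2, 5, 8, 9])

def Spec_count_charge (K : Int) (N : Int) (M : Int) (chargers : List Int) (out : Int) : Prop := out = count_charge_alt K N M chargers
instance (K : Int) (N : Int) (M : Int) (chargers : List Int) (out : Int) : Decidable (Spec_count_charge K N M chargers out) := by unfold Spec_count_charge; infer_instance

-- ===== CLAIM (what is proved, stated in full; the proofs are below) =====
def Claim_equal_count_charge : Prop := ∀ (K : Int) (N : Int) (M : Int) (chargers : List Int), Dom_count_charge K N M chargers → Pre_count_charge K N M chargers → Spec_count_charge K N M chargers (count_charge K N M chargers)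

-- ===== LEMMAS AND PROOFS =====

-- On an ascending list, takeWhile (· ≤ B) keeps exactly the elements ≤ B.
theorem takeWhile_eq_filter_of_pairwise (B : Int) :
    ∀ (l : List Int), l.Pairwise (· ≤ ·) →
      l.takeWhile (fun c => decide (c ≤ B)) = l.filter (fun c => decide (c ≤ B)) := by
  intro l hl
  induction l with
  | nil => simp
  | cons x t ih =>
    rcases List.pairwise_cons.mp hl with ⟨hx, ht⟩
    by_cases hxB : x ≤ B
    · simp [hxB, ih ht]
    · have : t.filter (fun c => decide (c ≤ B)) = [] := by
        apply List.filter_eq_nil_iff.mpr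
        intro y hy
        have := hx y hy
        simp; omega
      simp [hxB, this]

-- The last element of an ascending list bounds all of it.
theorem le_getLast?_of_pairwise :
    ∀ (l : List Int), l.Pairwise (· ≤ ·) → ∀ (b : Int), l.getLast? = some b →
      ∀ x ∈ l, x ≤ b := by
  intro l
  induction l with
  | nil => intro _ b hb; simp at hb
  | cons y t ih =>
    intro hl b hb x hx
    rcases List.pairwise_cons.mp hl with ⟨hy, ht⟩
    cases t with
    | nil =>
      simp at hb hx
      omega
    | cons z u =>
      rw [List.getLast?_cons_cons] at hb
      rcases List.mem_cons.mp hx with rfl | hx'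
      · have hb' : b ∈ z :: u := List.mem_of_getLast? hb
        exact hy b hb'
      · exact ih ht b hb x hx'

-- Main simulation: A's loop equals B's loop, where B's remaining suffix `rest` is
-- the sorted chargers minus an already-consumed prefix `a` of elements ≤ idx.
theorem loop_eq (K N : Int) (chargers : List Int) :
    ∀ (n : Nat) (idx count : Int) (a rest : List Int),
      (N - idx).toNat ≤ n → idx < N →
      PySem.List.sorted chargers (fun x => x) false = a ++ rest →
      (∀ x ∈ a, x ≤ idx) →
      loopA K N chargers idx count = some (loopB K N rest idx count) := by
  intro n
  induction n with
  | zero => intro idx count a rest hn hidx _ _; omega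
  | succ n ih =>
    intro idx count a rest hn hidx hs ha
    have hperm : (PySem.List.sorted chargers (fun x => x) false).Perm chargers :=
      PySem.List.sorted_perm chargers (fun x => x) false
    have hpair : (PySem.List.sorted chargers (fun x => x) false).Pairwise (· ≤ ·) :=
      PySem.List.sorted_pairwise chargers (fun x => x)
    rw [hs] at hpair hperm
    rcases List.pairwise_append.mp hpair with ⟨hpa, hpr, hcross⟩
    -- membership transfer: x ∈ rest → x ∈ chargers, and conversely via a
    have hmem_rest : ∀ x ∈ rest, x ∈ chargers := fun x hx =>
      hperm.mem_iff.mp (List.mem_append.mpr (Or.inr hx))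
    have hmem_ch : ∀ x ∈ chargers, idx < x → x ∈ rest := by
      intro x hx hgt
      rcases List.mem_append.mp (hperm.mem_iff.mpr hx) with h1 | h2
      · exact absurd (ha x h1) (by omega)
      · exact h2
    unfold loopA loopB
    simp only [hidx, dif_pos]
    by_cases hK : idx + K ≥ N
    · have : ¬ idx + K < N := by omega
      simp [hK, this]
    · have hKlt : idx + K < N := by omega
      simp only [hK, if_false, if_pos hKlt]
      set num := chargers.filter (fun c => decide (idx < c) && decide (c ≤ idx + K)) with hnum
      have htake := takeWhile_eq_filter_of_pairwise (idx + K) rest hpr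
      by_cases hlen : num.length = 0
      · -- A returns 0; B's best (if any) is ≤ idx, so B returns 0 too
        have hnil : num = [] := List.length_eq_zero_iff.mp hlen
        simp only [dif_pos hlen]
        rcases hgl : (rest.takeWhile (fun c => decide (c ≤ idx + K))).getLast? with _ | b
        · rfl
        · have hbmem : b ∈ rest.takeWhile (fun c => decide (c ≤ idx + K)) :=
            List.mem_of_getLast? hgl
          rw [htake] at hbmem
          have hbB : b ≤ idx + K := by
            have := List.of_mem_filter hbmem; simpa using this
          have hbrest : b ∈ rest := List.mem_of_mem_filter hbmem
          have hble : b ≤ idx := by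
            by_contra hgt
            have : b ∈ num := by
              rw [hnum]
              apply List.mem_filter.mpr
              refine ⟨hmem_rest b hbrest, ?_⟩
              simp; omega
            rw [hnil] at this; simp at this
          simp [hble]
      · -- A picks m = max num; B's best is that same m
        simp only [dif_neg hlen]
        have hnnil : num ≠ [] := fun h => hlen (by simp [h])
        rcases hmax : PySem.List.max? num (fun x => x) with _ | m
        · exact absurd (((PySem.List.max?_eq_none_iff num (fun x => x)).mp hmax)) hnnil
        · have hmmem : m ∈ num := PySem.List.max?_mem hmax
          have hmax' : ∀ y ∈ num, y ≤ m := by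
            intro y hy; exact PySem.List.max?_isMax hmax y hy
          have hmch : m ∈ chargers := List.mem_of_mem_filter hmmem
          have hmprop : idx < m ∧ m ≤ idx + K := by
            have := List.of_mem_filter hmmem; simpa using this
          have hmrest : m ∈ rest := hmem_ch m hmch hmprop.1
          have hmpre : m ∈ rest.takeWhile (fun c => decide (c ≤ idx + K)) := by
            rw [htake]
            exact List.mem_filter.mpr ⟨hmrest, by simp; omega⟩
          have hprene : rest.takeWhile (fun c => decide (c ≤ idx + K)) ≠ [] :=
            List.ne_nil_of_mem hmpre
          rcases hgl : (rest.takeWhile (fun c => decide (c ≤ idx + K))).getLast? with _ | b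
          · exact absurd (List.getLast?_eq_none_iff.mp hgl) hprene
          · have hpresorted : (rest.takeWhile (fun c => decide (c ≤ idx + K))).Pairwise (· ≤ ·) :=
              hpr.sublist (List.takeWhile_sublist _)
            have hmb : m ≤ b := le_getLast?_of_pairwise _ hpresorted b hgl m hmpre
            have hbmem : b ∈ rest.takeWhile (fun c => decide (c ≤ idx + K)) :=
              List.mem_of_getLast? hgl
            have hbB : b ≤ idx + K := by
              rw [htake] at hbmem
              have := List.of_mem_filter hbmem; simpa using this
            have hbrest : b ∈ rest := by
              rw [htake] at hbmem
              exact List.mem_of_mem_filter hbmem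
            have hbm : b ≤ m := by
              apply hmax'
              rw [hnum]
              apply List.mem_filter.mpr
              refine ⟨hmem_rest b hbrest, ?_⟩
              simp; omega
            have hbeq : b = m := le_antisymm hbm hmb
            subst hbeq
            have hbgt : ¬ b ≤ idx := by omega
            simp only [hbgt, if_false]
            -- recurse: new prefix a ++ takeWhile, new idx = b
            apply ih b (count + 1) (a ++ rest.takeWhile (fun c => decide (c ≤ idx + K)))
              (rest.dropWhile (fun c => decide (c ≤ idx + K)))
            · omega
            · omega
            · rw [hs, List.append_assoc, List.takeWhile_append_dropWhile]
            · intro x hx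
              rcases List.mem_append.mp hx with h1 | h2
              · have := ha x h1; omega
              · exact le_getLast?_of_pairwise _
                  (hpr.sublist (List.takeWhile_sublist _)) b hgl x h2

-- ===== VERDICT (by name: the statement is the Claim_ definition above) =====
theorem count_charge_spec : Claim_equal_count_charge := by
  unfold Claim_equal_count_charge
  intro K N M chargers _hdom hpre
  unfold Spec_count_charge count_charge count_charge_alt
  have := loop_eq K N chargers (N - 0).toNat 0 0 []
    (PySem.List.sorted chargers (fun x => x) false) (le_refl _) hpre rfl (by simp)
  rw [this]
  rfl
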